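-- pv_equiv track=rewrite | github.com/vhavlena/Noodler | noodler/formula_preprocess.py | _replace_side
-- ===== SOURCE A (Python) =====
-- from typing import Dict, Type, Union, Sequence, Set, Optional, Callable
--
-- def _replace_side(find: Sequence[str], replace: Sequence[str], side: Sequence[str]) -> Sequence[str]:
--     """
--     Replace subsequences in a given equation side.
--     @param find: Sequence to be found
--     @param replace: Replacement
--     @param side: Sequnce of variable representing an equation side.
--     """
--
--     ret = []
--     i = 0
--     while i < len(side):
--         if find[0] == side[i] and side[i:i+len(find)] == find:
--             ret += replace
--             i += len(find)
--         else:
--             ret.append(side[i])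
--             i += 1
--
--     return ret
-- ===== SOURCE B (Python) =====
-- def _replace_side(find, replace, side):
--     """KMP matching (failure table + one pass): left-to-right non-overlapping replacement."""
--     m = len(find)
--     if m == 0:
--         return list(side)
--     # failure (border) table: pi[q] = length of longest proper border of find[:q]
--     pi = [0] * (m + 1)
--     k = 0
--     for q in range(1, m):
--         while k > 0 and find[q] != find[k]:
--             k = pi[k]
--         if find[q] == find[k]:
--             k += 1
--         pi[q + 1] = k
--     out = []
--     q = 0
--     for tok in side:
--         while q > 0 and tok != find[q]:
--             q = pi[q]
--         if tok == find[q]: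
--             q += 1
--         out.append(tok)
--         if q == m:
--             del out[len(out) - m:]
--             out.extend(replace)
--             q = 0
--     return out
-- ===== Notes on version B (the rewrite author's own statement) =====
-- stated objective: alternative
-- what changed: Replaces A's naive scan (re-checking the whole pattern at every position via slice comparison) with KMP: a precomputed failure table and a single left-to-right pass with non-overlapping restart; intended as faster (O(n+m) vs O(n*m)) but measured only 1.4x at the largest size, so claimed as alternative.
import Mathlib
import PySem

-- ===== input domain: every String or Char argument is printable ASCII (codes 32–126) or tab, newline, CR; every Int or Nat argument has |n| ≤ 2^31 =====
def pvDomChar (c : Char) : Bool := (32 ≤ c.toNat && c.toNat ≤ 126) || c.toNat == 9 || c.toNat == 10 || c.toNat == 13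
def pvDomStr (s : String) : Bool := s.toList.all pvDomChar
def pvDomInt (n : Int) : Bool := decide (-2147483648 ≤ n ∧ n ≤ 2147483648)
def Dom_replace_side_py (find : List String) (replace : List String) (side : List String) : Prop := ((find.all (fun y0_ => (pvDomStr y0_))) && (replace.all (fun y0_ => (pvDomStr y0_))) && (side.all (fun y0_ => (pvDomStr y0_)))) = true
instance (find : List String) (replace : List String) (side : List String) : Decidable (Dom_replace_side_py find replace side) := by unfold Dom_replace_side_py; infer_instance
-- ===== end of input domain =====

-- B replaces A's per-position rescan (check the whole pattern at every index) by KMP matching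
-- with a precomputed failure table (same left-to-right non-overlapping replacement; intended as
-- faster, but a timing run measured only ~1.4x at the largest size, so no speed is claimed).

-- ===== PORT A =====
-- A's while loop: index i, accumulator ret; fuel = side.length (i grows by ≥ 1 each turn).
def pvAGo (find replace side : List String) (ret : List String) (i : Nat) : Nat → List String
  | 0 => ret
  | fuel + 1 =>
    if h : i < side.length then
      -- `find[0] == side[i] and side[i:i+len(find)] == find`
      if PySem.List.pyGet? find 0 = PySem.List.pyGet? side (i : Int) ∧
         PySem.List.slice side (some (i : Int)) (some ((i : Int) + (find.length : Int))) = find then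
        pvAGo find replace side (ret ++ replace) (i + find.length) fuel
      else
        pvAGo find replace side (ret ++ [side[i]]) (i + 1) fuel
    else ret

def replace_side_py (find : List String) (replace : List String) (side : List String) : List String :=
  pvAGo find replace side [] 0 side.length

-- ===== PORT B =====
-- `while k > 0 and c != find[k]: k = pi[k]` — fuel-bounded; fuel = initial k suffices
-- because the failure table strictly decreases (proved below).
def pvWhileB (find : List String) (pi : List Nat) : Nat → Nat → String → Nat
  | 0, k, _ => k
  | fuel + 1, k, c =>
    if k ≠ 0 ∧ PySem.List.pyGet? find (k : Int) ≠ some c then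
      pvWhileB find pi fuel (pi.getD k 0) c
    else k

-- the shared while+if step of B's two loops
def pvStep (find : List String) (pi : List Nat) (q : Nat) (c : String) : Nat :=
  let k := pvWhileB find pi q q c
  if PySem.List.pyGet? find (k : Int) = some c then k + 1 else k

-- one iteration of `for q in range(1, m)` building the failure table
def pvBuildStep (find : List String) (st : List Nat × Nat) (q : Nat) : List Nat × Nat :=
  let k2 := pvStep find st.1 st.2 (find.getD q "")
  (st.1.set (q + 1) k2, k2)

def pvBuild (find : List String) : List Nat × Nat :=
  (List.range' 1 (find.length - 1)).foldl (pvBuildStep find) (List.replicate (find.length + 1) 0, 0)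

-- one iteration of `for tok in side`
def pvMatchStep (find replace : List String) (pi : List Nat) (st : List String × Nat) (tok : String) : List String × Nat :=
  let q2 := pvStep find pi st.2 tok
  let out := st.1 ++ [tok]
  if q2 = find.length then (out.take (out.length - find.length) ++ replace, 0) else (out, q2)

def replace_side_py_alt (find : List String) (replace : List String) (side : List String) : List String :=
  if find.length = 0 then side
  else (side.foldl (pvMatchStep find replace (pvBuild find).1) ([], 0)).1

-- ===== PRECONDITION & SPEC =====
-- Pre_ excludes only the inputs where A raises IndexError (`find[0]` with empty `find` and nonempty `side`).
def Pre_replace_side_py (find : List String) (replace : List String) (side : List String) : Prop :=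
  find ≠ [] ∨ side = []
instance (find : List String) (replace : List String) (side : List String) : Decidable (Pre_replace_side_py find replace side) := by unfold Pre_replace_side_py; infer_instance

def pvWitness_replace_side_py : List String × List String × List String :=
  (["a"], ["b"], ["a", "c", "a"])

def Spec_replace_side_py (find : List String) (replace : List String) (side : List String) (out : List String) : Prop := out = replace_side_py_alt find replace side
instance (find : List String) (replace : List String) (side : List String) (out : List String) : Decidable (Spec_replace_side_py find replace side out) := by unfold Spec_replace_side_py; infer_instance

-- ===== CLAIM (what is proved, stated in full; the proofs are below) =====
def Claim_equal_replace_side_py : Prop := ∀ (find : List String) (replace : List String) (side : List String), Dom_replace_side_py find replace side → Pre_replace_side_py find replace side → Spec_replace_side_py find replace side (replace_side_py find replace side)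

-- ===== LEMMAS AND PROOFS =====

-- the reference function both ports are reduced to: greedy leftmost non-overlapping replacement
def pvGo (P replace : List String) : List String → List String
  | [] => []
  | x :: xs =>
    if P.isPrefixOf (x :: xs) then replace ++ pvGo P replace (xs.drop (P.length - 1))
    else x :: pvGo P replace xs
termination_by s => s.length
decreasing_by
  all_goals simp only [List.length_drop, List.length_cons]
  all_goals omega

-- maxMatch: length of the longest prefix of P that is a suffix of t (capped at |P|)
def pvMM (P t : List String) : Nat := Nat.findGreatest (fun k => P.take k <:+ t) P.length

-- maxBorder via maxMatch of the tail of take q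
def pvMB (P : List String) (q : Nat) : Nat := pvMM P ((P.take q).drop 1)

theorem pvMM_suffix (P t : List String) : P.take (pvMM P t) <:+ t := by
  unfold pvMM
  exact Nat.findGreatest_spec (P := fun k => P.take k <:+ t) (Nat.zero_le _) (by simp)

theorem pvMM_le (P t : List String) : pvMM P t ≤ P.length := Nat.findGreatest_le _

theorem pvMM_ge (P t : List String) {k : Nat} (hk : k ≤ P.length) (h : P.take k <:+ t) :
    k ≤ pvMM P t := Nat.le_findGreatest hk h

theorem pvMM_le_len (P t : List String) : pvMM P t ≤ t.length := by
  have h1 := pvMM_suffix P t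
  have h2 := h1.length_le
  have h3 : (P.take (pvMM P t)).length = pvMM P t := by
    simp [List.length_take]; exact pvMM_le P t
  omega

theorem pvMM_nil (P : List String) : pvMM P [] = 0 := by
  have := pvMM_le_len P []
  simp only [List.length_nil] at this
  omega

theorem pvMM_eq_len_iff (P t : List String) : pvMM P t = P.length ↔ P <:+ t := by
  constructor
  · intro h
    have := pvMM_suffix P t
    rwa [h, List.take_length] at this
  · intro h
    have := pvMM_ge P t (le_refl _) (by rwa [List.take_length])
    have := pvMM_le P t
    omega

theorem pvMM_congr (P a b : List String)
    (h : ∀ k, k ≤ P.length → (P.take k <:+ a ↔ P.take k <:+ b)) : pvMM P a = pvMM P b := by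
  have h1 : pvMM P a ≤ pvMM P b :=
    pvMM_ge P b (pvMM_le P a) ((h _ (pvMM_le P a)).mp (pvMM_suffix P a))
  have h2 : pvMM P b ≤ pvMM P a :=
    pvMM_ge P a (pvMM_le P b) ((h _ (pvMM_le P b)).mpr (pvMM_suffix P b))
  omega

theorem suffix_of_suffix_len_le {s u t : List String} (hs : s <:+ t) (hu : u <:+ t)
    (hl : s.length ≤ u.length) : s <:+ u := by
  obtain ⟨w, rfl⟩ := hu
  obtain ⟨w', hw'⟩ := hs
  have hlen : w.length ≤ w'.length := by
    have := congrArg List.length hw'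
    simp only [List.length_append] at this
    omega
  refine ⟨w'.drop w.length, ?_⟩
  have h2 := congrArg (List.drop w.length) hw'
  rw [List.drop_left, List.drop_append_of_le_length hlen] at h2
  exact h2

theorem suffix_drop_one {s u : List String} (hs : s <:+ u) (hl : s.length + 1 ≤ u.length) :
    s <:+ u.drop 1 := by
  obtain ⟨w, rfl⟩ := hs
  have hw : 1 ≤ w.length := by
    simp only [List.length_append] at hl
    omega
  refine ⟨w.drop 1, ?_⟩
  rw [List.drop_append_of_le_length hw]

theorem snoc_suffix_snoc {s t : List String} {x c : String} :
    s ++ [x] <:+ t ++ [c] ↔ x = c ∧ s <:+ t := by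
  constructor
  · rintro ⟨w, hw⟩
    rw [← List.append_assoc] at hw
    have := List.append_inj' hw (by simp)
    refine ⟨by simpa using this.2, ⟨w, this.1⟩⟩
  · rintro ⟨rfl, w, rfl⟩
    exact ⟨w, by simp⟩

theorem take_succ_eq (P : List String) (j : Nat) (h : j < P.length) :
    P.take (j + 1) = P.take j ++ [P[j]] := by
  rw [List.take_succ]; simp [List.getElem?_eq_getElem h]

theorem take_snoc_iff (P t : List String) (c : String) (j : Nat) (h : j < P.length) :
    P.take (j + 1) <:+ t ++ [c] ↔ P.take j <:+ t ∧ P[j] = c := by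
  rw [take_succ_eq P j h, snoc_suffix_snoc]
  tauto

theorem pvMM_snoc_le (P t : List String) (c : String) : pvMM P (t ++ [c]) ≤ pvMM P t + 1 := by
  rcases Nat.eq_zero_or_pos (pvMM P (t ++ [c])) with h | h
  · omega
  · obtain ⟨j, hj⟩ : ∃ j, pvMM P (t ++ [c]) = j + 1 := ⟨_, (Nat.succ_pred_eq_of_pos h).symm⟩
    have hle := pvMM_le P (t ++ [c])
    have hsuf := pvMM_suffix P (t ++ [c])
    rw [hj] at hsuf hle
    have := (take_snoc_iff P t c j (by omega)).mp hsuf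
    have := pvMM_ge P t (k := j) (by omega) this.1
    omega

theorem pvMB_lt (P : List String) (j : Nat) (h1 : 1 ≤ j) (h2 : j ≤ P.length) : pvMB P j < j := by
  have := pvMM_le_len P ((P.take j).drop 1)
  simp only [List.length_drop, List.length_take] at this
  unfold pvMB
  omega

-- fuel irrelevance for the while loop, given a strictly decreasing table on the reachable indices
theorem pvWhileB_fuel (P : List String) (pi : List Nat) (c : String) (K : Nat)
    (hchain : ∀ j, 1 ≤ j → j ≤ K → pi.getD j 0 < j) :
    ∀ k, k ≤ K → ∀ f1 f2, k ≤ f1 → k ≤ f2 → pvWhileB P pi f1 k c = pvWhileB P pi f2 k c := by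
  intro k
  induction k using Nat.strong_induction_on with
  | _ k ih =>
    intro hk f1 f2 h1 h2
    by_cases hc : k ≠ 0 ∧ PySem.List.pyGet? P (k : Int) ≠ some c
    · obtain ⟨g1, rfl⟩ : ∃ x, f1 = x + 1 := ⟨f1 - 1, by omega⟩
      obtain ⟨g2, rfl⟩ : ∃ x, f2 = x + 1 := ⟨f2 - 1, by omega⟩
      rw [pvWhileB, pvWhileB, if_pos hc, if_pos hc]
      have hlt : pi.getD k 0 < k := hchain k (by omega) hk
      exact ih _ hlt (by omega) g1 g2 (by omega) (by omega)
    · have h0 : k = 0 ∨ PySem.List.pyGet? P (k : Int) = some c := by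
        by_cases hz : k = 0
        · exact Or.inl hz
        · exact Or.inr (by by_contra hne; exact hc ⟨hz, hne⟩)
      rcases h0 with rfl | hs
      · cases f1 <;> cases f2 <;> simp [pvWhileB]
      · cases f1 <;> cases f2 <;> simp [pvWhileB, hs]

-- take j P is a suffix of (take q P).drop 1 iff it is a suffix of t strictly shorter than q,
-- where q = pvMM P t
theorem take_suffix_tail_iff (P t : List String) (q j : Nat) (hq : q = pvMM P t)
    (hq1 : 1 ≤ q) (hqm : q ≤ P.length) (hj : j ≤ P.length) :
    P.take j <:+ (P.take q).drop 1 ↔ (j < q ∧ P.take j <:+ t) := by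
  have hqt : P.take q <:+ t := hq ▸ pvMM_suffix P t
  have hlq : (P.take q).length = q := by simp [List.length_take]; omega
  have hljn : (P.take j).length = j := by simp [List.length_take]; omega
  constructor
  · intro h
    have h1 : P.take j <:+ P.take q := h.trans (List.drop_suffix _ _)
    have hlen := h.length_le
    rw [List.length_drop, hlq, hljn] at hlen
    exact ⟨by omega, h1.trans hqt⟩
  · rintro ⟨hlt, hsuf⟩
    have h1 : P.take j <:+ P.take q :=
      suffix_of_suffix_len_le hsuf hqt (by rw [hljn, hlq]; omega)
    exact suffix_drop_one h1 (by rw [hljn, hlq]; omega)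

-- the central KMP step lemma
theorem pvStep_mm (P : List String) (pi : List Nat) (c : String) :
    ∀ q, ∀ t : List String, q = pvMM P t → q < P.length →
    (∀ j, 1 ≤ j → j ≤ q → pi.getD j 0 = pvMB P j) →
    pvStep P pi q c = pvMM P (t ++ [c]) := by
  intro q
  induction q using Nat.strong_induction_on with
  | _ q ih =>
    intro t hq hqm htab
    by_cases hPq : PySem.List.pyGet? P (q : Int) = some c
    · -- the while loop exits at once; the match extends by one
      have hwq : pvWhileB P pi q q c = q := by
        cases q with
        | zero => rfl
        | succ n => rw [pvWhileB, if_neg (by push_cast at hPq ⊢; simp [hPq])]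
      unfold pvStep
      rw [hwq, if_pos hPq]
      have hget : P[q] = c := by
        rw [PySem.List.pyGet?_natCast, List.getElem?_eq_getElem hqm] at hPq
        exact Option.some.inj hPq
      have h1 : q + 1 ≤ pvMM P (t ++ [c]) :=
        pvMM_ge P _ (by omega) ((take_snoc_iff P t c q hqm).mpr ⟨hq ▸ pvMM_suffix P t, hget⟩)
      have h2 := pvMM_snoc_le P t c
      omega
    · rcases Nat.eq_zero_or_pos q with hq0 | hq1
      · -- q = 0 and P[0] ≠ c: no match at all
        subst hq0
        have hw : pvWhileB P pi 0 0 c = 0 := rfl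
        unfold pvStep
        rw [hw, if_neg hPq]
        symm
        by_contra hne
        have hpos : 1 ≤ pvMM P (t ++ [c]) := by omega
        obtain ⟨j, hj⟩ : ∃ j, pvMM P (t ++ [c]) = j + 1 :=
          ⟨_, (Nat.succ_pred_eq_of_pos hpos).symm⟩
        have hle := pvMM_le P (t ++ [c])
        rw [hj] at hle
        have hsuf := pvMM_suffix P (t ++ [c])
        rw [hj] at hsuf
        obtain ⟨hts, hgc⟩ := (take_snoc_iff P t c j (by omega)).mp hsuf
        have hj0 : j = 0 := by
          have := pvMM_ge P t (k := j) (by omega) hts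
          omega
        subst hj0
        exact hPq (by rw [PySem.List.pyGet?_natCast, List.getElem?_eq_getElem hqm, hgc])
      · -- q ≥ 1 and P[q] ≠ c: follow the failure link and recurse
        obtain ⟨f, rfl⟩ : ∃ f, q = f + 1 := ⟨q - 1, by omega⟩
        have hcond : ((f + 1 : Nat) ≠ 0 ∧ PySem.List.pyGet? P ((f + 1 : Nat) : Int) ≠ some c) :=
          ⟨by omega, hPq⟩
        have hbval : pi.getD (f + 1) 0 = pvMB P (f + 1) := htab (f + 1) (by omega) (le_refl _)
        set b := pi.getD (f + 1) 0 with hb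
        have hblt : b < f + 1 := hbval ▸ pvMB_lt P (f + 1) (by omega) (by omega)
        have hbm : b = pvMM P ((P.take (f + 1)).drop 1) := hbval
        have hw1 : pvWhileB P pi (f + 1) (f + 1) c = pvWhileB P pi f b c := by
          rw [pvWhileB, if_pos hcond]
        have hw2 : pvWhileB P pi f b c = pvWhileB P pi b b c := by
          apply pvWhileB_fuel P pi c (f + 1) ?_ b (by omega) f b (by omega) (le_refl b)
          intro j hj1 hj2
          rw [htab j hj1 hj2]
          exact pvMB_lt P j hj1 (by omega)
        have hstep : pvStep P pi (f + 1) c = pvStep P pi b c := by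
          unfold pvStep
          rw [hw1, hw2]
        rw [hstep]
        have hIH := ih b hblt ((P.take (f + 1)).drop 1) hbm (by omega)
          (fun j h1 h2 => htab j h1 (by omega))
        rw [hIH]
        apply pvMM_congr
        intro k hk
        cases k with
        | zero => simp
        | succ j =>
          have hjm : j < P.length := by omega
          rw [take_snoc_iff P _ c j hjm, take_snoc_iff P t c j hjm]
          by_cases hPj : P[j] = c
          · simp only [hPj, and_true]
            rw [take_suffix_tail_iff P t (f + 1) j hq (by omega) (by omega) (by omega)]
            constructor
            · tauto
            · intro hs
              refine ⟨?_, hs⟩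
              have hle : j ≤ pvMM P t := pvMM_ge P t (by omega) hs
              rcases Nat.lt_or_ge j (f + 1) with h | h
              · exact h
              · exfalso
                have hj' : j = f + 1 := by omega
                subst hj'
                exact hPq (by rw [PySem.List.pyGet?_natCast, List.getElem?_eq_getElem hqm, hPj])
          · simp [hPj]

-- correctness of the failure-table construction
theorem getD_set_self (pi : List Nat) (i v : Nat) (h : i < pi.length) :
    (pi.set i v).getD i 0 = v := by
  simp [List.getD_eq_getElem?_getD,  h]

theorem getD_set_other (pi : List Nat) (i j v : Nat) (h : i ≠ j) :
    (pi.set i v).getD j 0 = pi.getD j 0 := by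
  simp [List.getD_eq_getElem?_getD,  h]

theorem pvMB_succ (P : List String) (q : Nat) (h1 : 1 ≤ q) (hq : q < P.length) :
    pvMB P (q + 1) = pvMM P (((P.take q).drop 1) ++ [P[q]]) := by
  unfold pvMB
  congr 1
  rw [take_succ_eq P q hq]
  rw [List.drop_append_of_le_length (by simp [List.length_take]; omega)]

theorem buildFold_inv (P : List String) (hm : 1 ≤ P.length) :
    ∀ n q pi k, 1 ≤ q → q + n = P.length → pi.length = P.length + 1 →
    (∀ j, 1 ≤ j → j ≤ q → pi.getD j 0 = pvMB P j) → k = pvMB P q →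
    ∀ j, 1 ≤ j → j ≤ P.length →
    ((List.range' q n).foldl (pvBuildStep P) (pi, k)).1.getD j 0 = pvMB P j := by
  intro n
  induction n with
  | zero =>
    intro q pi k h1 h2 h3 h4 h5 j hj1 hj2
    simp only [List.range', List.foldl_nil]
    exact h4 j hj1 (by omega)
  | succ n ihn =>
    intro q pi k h1 h2 h3 h4 h5 j hj1 hj2
    rw [List.range'_succ, List.foldl_cons]
    have hqm : q < P.length := by omega
    have hgetq : P.getD q "" = P[q] := List.getD_eq_getElem P "" hqm
    have hblt : pvMB P q < q := pvMB_lt P q h1 (by omega)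
    have hstep : pvStep P pi k (P.getD q "") = pvMB P (q + 1) := by
      rw [hgetq]
      rw [pvStep_mm P pi (P[q]) k ((P.take q).drop 1) h5 (by omega)
        (fun j' ha hb => h4 j' ha (by omega))]
      exact (pvMB_succ P q h1 hqm).symm
    show ((List.range' (q+1) n).foldl (pvBuildStep P) (pvBuildStep P (pi, k) q)).1.getD j 0 = pvMB P j
    unfold pvBuildStep
    simp only [hstep]
    apply ihn (q + 1) _ _ (by omega) (by omega) (by rw [List.length_set]; exact h3) ?_ rfl j hj1 hj2
    intro j' ha hb
    rcases Nat.lt_or_ge j' (q + 1) with hlt | hge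
    · rw [getD_set_other _ _ _ _ (by omega)]
      exact h4 j' ha (by omega)
    · have : j' = q + 1 := by omega
      subst this
      exact getD_set_self pi (q + 1) _ (by omega)

theorem pvBuild_correct (P : List String) (hm : 1 ≤ P.length) :
    ∀ j, 1 ≤ j → j ≤ P.length → (pvBuild P).1.getD j 0 = pvMB P j := by
  intro j hj1 hj2
  unfold pvBuild
  apply buildFold_inv P hm (P.length - 1) 1 _ 0 (le_refl 1) (by omega)
    (by rw [List.length_replicate]) ?_ ?_ j hj1 hj2
  · intro j' ha hb
    have hj' : j' = 1 := by omega
    subst hj'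
    have hnil : (P.take 1).drop 1 = [] := by
      rw [List.drop_eq_nil_iff]
      simp [List.length_take]
    unfold pvMB
    rw [hnil, pvMM_nil]
    simp
  · have hnil : (P.take 1).drop 1 = [] := by
      rw [List.drop_eq_nil_iff]
      simp [List.length_take]
    unfold pvMB
    rw [hnil, pvMM_nil]

def pvNoEnd (P v : List String) : Prop := ∀ j, j ≤ v.length → ¬ (P <:+ v.take j)

theorem suffix_cons_self (x : String) (l : List String) : l <:+ x :: l := ⟨[x], rfl⟩

theorem pvNoEnd_tail {P v : List String} {x : String} (h : pvNoEnd P (x :: v)) : pvNoEnd P v := by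
  intro j hj hs
  exact h (j + 1) (by simp; omega) (by rw [List.take_succ_cons]; exact hs.trans (suffix_cons_self _ _))

theorem pvGo_no (P replace v : List String) (hm : P ≠ []) (h : pvNoEnd P v) :
    pvGo P replace v = v := by
  induction v with
  | nil => simp [pvGo]
  | cons x xs ih =>
    have hnp : ¬ P.isPrefixOf (x :: xs) := by
      intro hp
      rw [List.isPrefixOf_iff_prefix] at hp
      have htake : P = (x :: xs).take P.length := List.prefix_iff_eq_take.mp hp
      exact h P.length hp.length_le (by rw [← htake])
    rw [pvGo, if_neg hnp]
    rw [ih (pvNoEnd_tail h)]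

theorem pvGo_first (P replace u : List String) (hm : 1 ≤ P.length) (hu : P <:+ u)
    (hmin : ∀ j, j < u.length → ¬ P <:+ u.take j) (z : List String) :
    pvGo P replace (u ++ z) = u.take (u.length - P.length) ++ replace ++ pvGo P replace z := by
  induction u with
  | nil =>
    rw [List.suffix_nil] at hu
    subst hu
    simp at hm
  | cons x xs ih =>
    have hlenle : P.length ≤ (x :: xs).length := hu.length_le
    by_cases hlen : (x :: xs).length = P.length
    · have hPu : P = x :: xs := by
        have hd := List.suffix_iff_eq_drop.mp hu
        simp only [List.length_cons] at hd hlen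
        rw [show xs.length + 1 - P.length = 0 from by omega] at hd
        simpa using hd
      rw [List.cons_append, pvGo, if_pos (by
        rw [List.isPrefixOf_iff_prefix, hPu, ← List.cons_append]
        exact List.prefix_append _ _)]
      have hxs : xs.length = P.length - 1 := by simp at hlen; omega
      have hdz : (xs ++ z).drop (P.length - 1) = z := by
        rw [← hxs, List.drop_left]
      have ht0 : (x :: xs).length - P.length = 0 := by omega
      rw [hdz, ht0]
      simp
    · have hlt : P.length < (x :: xs).length := by omega
      have hnp : ¬ P.isPrefixOf (x :: (xs ++ z)) := by
        rw [List.isPrefixOf_iff_prefix]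
        intro hp
        have htake : P = (x :: (xs ++ z)).take P.length := List.prefix_iff_eq_take.mp hp
        have heq : (x :: (xs ++ z)).take P.length = (x :: xs).take P.length := by
          rw [← List.cons_append, List.take_append_of_le_length hlenle]
        have h2 : P = (x :: xs).take P.length := htake.trans heq
        exact hmin P.length hlt (by rw [← h2])
      rw [List.cons_append, pvGo, if_neg hnp]
      have hPxs : P <:+ xs := by
        have hd := List.suffix_iff_eq_drop.mp hu
        have h1 : (x :: xs).length - P.length = (xs.length - P.length) + 1 := by
          simp only [List.length_cons] at hlt ⊢; omega
        rw [h1, List.drop_succ_cons] at hd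
        rw [hd]
        exact List.drop_suffix _ _
      have hminxs : ∀ j, j < xs.length → ¬ P <:+ xs.take j := by
        intro j hj hs
        exact hmin (j + 1) (by simp; omega)
          (by rw [List.take_succ_cons]; exact hs.trans (suffix_cons_self _ _))
      rw [ih hPxs hminxs]
      have h2 : (x :: xs).length - P.length = (xs.length - P.length) + 1 := by
        simp only [List.length_cons] at hlt ⊢; omega
      rw [h2, List.take_succ_cons]
      simp

theorem matchFold_inv (P replace : List String) (pi : List Nat) (hm : 1 ≤ P.length)
    (htab : ∀ j, 1 ≤ j → j ≤ P.length → pi.getD j 0 = pvMB P j) :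
    ∀ (rest R v : List String) (q : Nat), q = pvMM P v → pvNoEnd P v →
    (rest.foldl (pvMatchStep P replace pi) (R ++ v, q)).1 = R ++ pvGo P replace (v ++ rest) := by
  have hP : P ≠ [] := by rintro rfl; simp at hm
  intro rest
  induction rest with
  | nil =>
    intro R v q hq hne
    rw [List.foldl_nil, List.append_nil]
    rw [pvGo_no P replace v hP hne]
  | cons c rest' ih =>
    intro R v q hq hne
    have hqm : q < P.length := by
      rcases Nat.lt_or_ge q P.length with h | h
      · exact h
      · exfalso
        have hle := pvMM_le P v
        have heq : pvMM P v = P.length := by omega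
        have hsuf : P <:+ v := (pvMM_eq_len_iff P v).mp heq
        exact hne v.length (le_refl _) (by rw [List.take_length]; exact hsuf)
    rw [List.foldl_cons]
    have hstep2 : pvStep P pi q c = pvMM P (v ++ [c]) :=
      pvStep_mm P pi c q v hq hqm (fun j a b => htab j a (by omega))
    show (rest'.foldl (pvMatchStep P replace pi) (pvMatchStep P replace pi (R ++ v, q) c)).1
        = R ++ pvGo P replace (v ++ c :: rest')
    have hstepped : pvMatchStep P replace pi (R ++ v, q) c =
        (if pvMM P (v ++ [c]) = P.length
         then (((R ++ v) ++ [c]).take ((((R ++ v) ++ [c])).length - P.length) ++ replace, 0)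
         else ((R ++ v) ++ [c], pvMM P (v ++ [c]))) := by
      unfold pvMatchStep
      rw [hstep2]
    rw [hstepped]
    have happc : v ++ c :: rest' = (v ++ [c]) ++ rest' := by simp
    by_cases hq2 : pvMM P (v ++ [c]) = P.length
    · rw [if_pos hq2]
      have hu : P <:+ (v ++ [c]) := (pvMM_eq_len_iff P (v ++ [c])).mp hq2
      have hmu : P.length ≤ (v ++ [c]).length := hu.length_le
      have hminu : ∀ j, j < (v ++ [c]).length → ¬ P <:+ (v ++ [c]).take j := by
        intro j hj
        simp only [List.length_append, List.length_cons, List.length_nil] at hj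
        rw [List.take_append_of_le_length (by omega)]
        exact hne j (by omega)
      have hout : ((R ++ v) ++ [c]).take (((R ++ v) ++ [c]).length - P.length)
          = R ++ (v ++ [c]).take ((v ++ [c]).length - P.length) := by
        rw [List.append_assoc]
        have hlen : (R ++ (v ++ [c])).length - P.length
            = R.length + ((v ++ [c]).length - P.length) := by
          simp only [List.length_append, List.length_cons, List.length_nil] at hmu ⊢
          omega
        rw [hlen, List.take_length_add_append]
      have hres := ih (R ++ (v ++ [c]).take ((v ++ [c]).length - P.length) ++ replace) [] 0
        (pvMM_nil P).symm
        (by intro j hj h; rw [List.take_nil, List.suffix_nil] at h; exact hP h)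
      simp only [List.append_nil, List.nil_append] at hres
      rw [hout, hres]
      rw [happc, pvGo_first P replace (v ++ [c]) hm hu hminu rest']
      simp [List.append_assoc]
    · rw [if_neg hq2]
      have hne' : pvNoEnd P (v ++ [c]) := by
        intro j hj h
        simp only [List.length_append, List.length_cons, List.length_nil] at hj
        rcases Nat.lt_or_ge j (v.length + 1) with hlt | hge
        · rw [List.take_append_of_le_length (by omega)] at h
          exact hne j (by omega) h
        · have hjeq : j = v.length + 1 := by omega
          subst hjeq
          rw [List.take_of_length_le (by simp)] at h
          exact hq2 ((pvMM_eq_len_iff P (v ++ [c])).mpr h)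
      have hres := ih R (v ++ [c]) (pvMM P (v ++ [c])) rfl hne'
      rw [List.append_assoc] at hres ⊢
      rw [hres, ← List.append_assoc, ← happc]

theorem pvAGo_eq (find replace side : List String) (hf : find ≠ []) :
    ∀ fuel i ret, side.length ≤ i + fuel →
    pvAGo find replace side ret i fuel = ret ++ pvGo find replace (side.drop i) := by
  intro fuel
  induction fuel with
  | zero =>
    intro i ret hle
    have hnil : side.drop i = [] := List.drop_eq_nil_iff.mpr (by omega)
    simp [pvAGo, hnil, pvGo]
  | succ fuel ih =>
    intro i ret hle
    by_cases h : i < side.length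
    · rw [pvAGo, dif_pos h]
      have hd : side.drop i = side[i] :: side.drop (i + 1) := List.drop_eq_getElem_cons h
      obtain ⟨f0, fs, rfl⟩ : ∃ a l, find = a :: l := by
        cases find with
        | nil => exact absurd rfl hf
        | cons a l => exact ⟨a, l, rfl⟩
      have hget : PySem.List.pyGet? side (i : Int) = some side[i] := by
        rw [PySem.List.pyGet?_natCast]
        exact List.getElem?_eq_getElem h
      have hslice : PySem.List.slice side (some (i : Int)) (some ((i : Int) + ((f0 :: fs).length : Int)))
          = (side.drop i).take (f0 :: fs).length := PySem.List.slice_natCast_add side i (f0 :: fs).length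
      have hcond : (PySem.List.pyGet? (f0 :: fs) 0 = PySem.List.pyGet? side (i : Int) ∧
          PySem.List.slice side (some (i : Int)) (some ((i : Int) + ((f0 :: fs).length : Int))) = f0 :: fs)
          ↔ (f0 :: fs) <+: side.drop i := by
        rw [hget, hslice]
        constructor
        · rintro ⟨h1, h2⟩
          rw [← h2]
          exact List.take_prefix _ _
        · intro hp
          have ht : (f0 :: fs) = (side.drop i).take (f0 :: fs).length := List.prefix_iff_eq_take.mp hp
          refine ⟨?_, ht.symm⟩
          rw [hd] at hp
          obtain ⟨rfl, -⟩ := List.cons_prefix_cons.mp hp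
          rw [PySem.List.pyGet?_zero]
          rfl
      by_cases hc : (f0 :: fs) <+: side.drop i
      · rw [if_pos (hcond.mpr hc), ih _ _ (by simp; omega)]
        rw [hd, pvGo, if_pos (by rw [List.isPrefixOf_iff_prefix, ← hd]; exact hc)]
        have hdd : (side.drop (i + 1)).drop ((f0 :: fs).length - 1) = side.drop (i + (f0 :: fs).length) := by
          rw [List.drop_drop]
          congr 1
          simp
          omega
        rw [hdd]
        simp
      · rw [if_neg (fun hh => hc (hcond.mp hh)), ih _ _ (by omega)]
        rw [hd, pvGo, if_neg (by rw [List.isPrefixOf_iff_prefix, ← hd]; exact hc)]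
        simp
    · rw [pvAGo, dif_neg h]
      have hnil : side.drop i = [] := List.drop_eq_nil_iff.mpr (by omega)
      simp [hnil, pvGo]

-- ===== VERDICT (by name: the statement is the Claim_ definition above) =====
theorem replace_side_py_spec : Claim_equal_replace_side_py := by
  intro find replace side _hdom hpre
  unfold Spec_replace_side_py replace_side_py replace_side_py_alt
  rcases List.eq_nil_or_concat' find with rfl | _
  · rcases hpre with h | rfl
    · exact absurd rfl h
    · simp [pvAGo]
  · have hf : find ≠ [] := by rintro rfl; simp_all
    have hm : 1 ≤ find.length := List.length_pos_iff.mpr hf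
    rw [pvAGo_eq find replace side hf side.length 0 [] (by omega)]
    rw [if_neg (by omega)]
    have h0 : pvMM find [] = 0 := pvMM_nil find
    have := matchFold_inv find replace (pvBuild find).1 hm (pvBuild_correct find hm)
      side [] [] 0 h0.symm (by intro j _ h; rw [List.take_nil, List.suffix_nil] at h; subst h; simp at hm)
    simpa using this.symm
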